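-- pv_equiv track=rewrite | github.com/Inaba-Kenji/algorithm | free株式会社_20240509_コーディングテスト解説/find_budget_combinations_2-2.py | find_budget_combinations2
-- ===== SOURCE A (Python) =====
-- def find_budget_combinations2(total_price, total_gift, gift_prices):
--     gift_prices.sort()
--     left, right = 0, total_gift - 1
--     count = 0
--
--     while left < right:
--         if gift_prices[left] + gift_prices[right] <= total_price:
--             # 条件を満たす場合、leftからrightまでの全てが有効
--             count += right - left
--             left += 1
--         else:
--             # 条件を満たさない場合、rightを左に移動
--             right -= 1
--     return count
-- ===== SOURCE B (Python) =====
-- # Sort, then for each j count the earlier partners by binary search on the sorted prefix.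
-- # Note: like A, this sorts gift_prices in place (same observable mutation).
--
-- def _bisect_right(a, x, lo, hi):
--     """Insertion point for x in sorted a[lo:hi], to the right of equals."""
--     while lo < hi:
--         mid = (lo + hi) // 2
--         if x < a[mid]:
--             hi = mid
--         else:
--             lo = mid + 1
--     return lo
--
--
-- def find_budget_combinations2(total_price, total_gift, gift_prices):
--     gift_prices.sort()
--     count = 0
--     for j in range(1, total_gift):
--         count += _bisect_right(gift_prices, total_price - gift_prices[j], 0, j)
--     return count
-- ===== Notes on version B (the rewrite author's own statement) =====
-- stated objective: alternative
-- what changed: Replaces A's inward-moving two-pointer sweep (which counts right-left partners in blocks) with a per-element binary search: after sorting, for each index j it adds the insertion point of total_price - gift_prices[j] in the sorted prefix [0,j); like A it sorts gift_prices in place.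
import Mathlib
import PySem

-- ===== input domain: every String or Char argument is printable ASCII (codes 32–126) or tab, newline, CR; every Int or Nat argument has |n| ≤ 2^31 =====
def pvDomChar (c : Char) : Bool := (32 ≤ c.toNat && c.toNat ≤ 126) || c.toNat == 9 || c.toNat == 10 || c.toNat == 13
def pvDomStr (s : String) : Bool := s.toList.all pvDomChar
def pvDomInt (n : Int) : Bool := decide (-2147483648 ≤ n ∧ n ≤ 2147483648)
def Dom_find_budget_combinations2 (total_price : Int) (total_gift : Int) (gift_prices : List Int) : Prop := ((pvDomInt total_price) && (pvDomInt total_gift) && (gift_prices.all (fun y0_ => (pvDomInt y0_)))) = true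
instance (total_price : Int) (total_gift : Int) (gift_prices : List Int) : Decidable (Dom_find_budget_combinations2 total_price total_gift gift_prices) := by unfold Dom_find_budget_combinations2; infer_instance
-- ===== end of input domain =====

-- B replaces A's two-pointer sweep by a per-element binary search on the sorted prefix
-- (alternative algorithm, similar cost). Both A and B sort gift_prices in place; the
-- equivalence proved here is about the return value.

-- ===== PORT A =====
-- the while-loop of A: while left < right: …
def pvLoopA (T : Int) (s : List Int) (left right count : Int) : Int :=
  if _h : left < right then
    match PySem.List.pyGet? s left, PySem.List.pyGet? s right with
    | some a, some b =>
      if a + b ≤ T then pvLoopA T s (left + 1) right (count + (right - left))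
      else pvLoopA T s left (right - 1) count
    | _, _ => count      -- IndexError in Python; excluded by Pre_
  else count
termination_by (right - left).toNat
decreasing_by all_goals omega

def find_budget_combinations2 (total_price : Int) (total_gift : Int) (gift_prices : List Int) : Int :=
  pvLoopA total_price (PySem.List.sorted gift_prices (fun x => x)) 0 (total_gift - 1) 0

-- ===== PORT B =====
-- termination helper for the binary-search loop: lo ≤ (lo+hi)//2 < hi when lo < hi
lemma pv_fdiv2_bounds {lo hi : Int} (h : lo < hi) :
    lo ≤ PySem.Int.floordiv (lo + hi) 2 ∧ PySem.Int.floordiv (lo + hi) 2 < hi := by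
  have h2 : PySem.Int.floordiv (lo + hi) 2 = (lo + hi) / 2 := by
    simp only [PySem.Int.floordiv]
    rw [Int.fdiv_eq_ediv]
    simp
  omega

-- hand-written bisect_right of Source B: while lo < hi: mid = (lo+hi)//2; …
def pvBisectR (a : List Int) (x : Int) (lo hi : Int) : Int :=
  if _h : lo < hi then
    let mid := PySem.Int.floordiv (lo + hi) 2
    match PySem.List.pyGet? a mid with
    | some v => if x < v then pvBisectR a x lo mid else pvBisectR a x (mid + 1) hi
    | none => lo         -- IndexError in Python; excluded by Pre_
  else lo
termination_by (hi - lo).toNat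
decreasing_by
  · have := pv_fdiv2_bounds _h; omega
  · have := pv_fdiv2_bounds _h; omega

def find_budget_combinations2_alt (total_price : Int) (total_gift : Int) (gift_prices : List Int) : Int :=
  let s := PySem.List.sorted gift_prices (fun x => x)
  (PySem.List.pyRange 1 total_gift 1).foldl
    (fun count j => count + pvBisectR s (total_price - PySem.List.pyGetD s j 0) 0 j) 0

-- ===== PRECONDITION & SPEC =====
-- Pre_ excludes exactly the inputs where A raises IndexError (and B raises it too):
-- total_gift ≥ 2 together with total_gift > len(gift_prices).
def Pre_find_budget_combinations2 (total_price : Int) (total_gift : Int) (gift_prices : List Int) : Prop :=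
  total_gift ≤ (gift_prices.length : Int) ∨ total_gift ≤ 1
instance (total_price : Int) (total_gift : Int) (gift_prices : List Int) : Decidable (Pre_find_budget_combinations2 total_price total_gift gift_prices) := by unfold Pre_find_budget_combinations2; infer_instance

def pvWitness_find_budget_combinations2 : Int × Int × List Int := (10, 4, [3, 1, 2, 4])

def Spec_find_budget_combinations2 (total_price : Int) (total_gift : Int) (gift_prices : List Int) (out : Int) : Prop := out = find_budget_combinations2_alt total_price total_gift gift_prices
instance (total_price : Int) (total_gift : Int) (gift_prices : List Int) (out : Int) : Decidable (Spec_find_budget_combinations2 total_price total_gift gift_prices out) := by unfold Spec_find_budget_combinations2; infer_instance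

-- ===== CLAIM (what is proved, stated in full; the proofs are below) =====
def Claim_equal_find_budget_combinations2 : Prop := ∀ (total_price : Int) (total_gift : Int) (gift_prices : List Int), Dom_find_budget_combinations2 total_price total_gift gift_prices → Pre_find_budget_combinations2 total_price total_gift gift_prices → Spec_find_budget_combinations2 total_price total_gift gift_prices (find_budget_combinations2 total_price total_gift gift_prices)

-- ===== LEMMAS AND PROOFS =====

-- number of partners i with l ≤ i < j and s[i] + s[j] ≤ T
def pvCnt (T : Int) (s : List Int) (l j : ℕ) : ℕ :=
  ((Finset.Ico l j).filter (fun i => s.getD i 0 + s.getD j 0 ≤ T)).card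

-- number of pairs l ≤ i < j ≤ r with s[i] + s[j] ≤ T
def pvP (T : Int) (s : List Int) (l r : ℕ) : ℕ :=
  ∑ j ∈ Finset.Ico (l + 1) (r + 1), pvCnt T s l j

lemma pv_mono {s : List Int} (hs : s.Pairwise (· ≤ ·)) {i j : ℕ}
    (hij : i ≤ j) (hj : j < s.length) : s.getD i 0 ≤ s.getD j 0 := by
  rcases eq_or_lt_of_le hij with rfl | h
  · exact le_refl _
  · rw [List.getD_eq_getElem _ _ (lt_trans h hj), List.getD_eq_getElem _ _ hj]
    exact List.pairwise_iff_getElem.mp hs i j (lt_trans h hj) hj h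

-- the set counted by bisect_right, once lo = hi: everything below lo
lemma pv_filter_card {s : List Int} {x : Int} {lo hi0 : ℕ} (hlh : lo ≤ hi0)
    (h1 : ∀ i, i < lo → s.getD i 0 ≤ x)
    (h2 : ∀ i, lo ≤ i → i < hi0 → x < s.getD i 0) :
    ((Finset.range hi0).filter (fun i => s.getD i 0 ≤ x)).card = lo := by
  have hset : (Finset.range hi0).filter (fun i => s.getD i 0 ≤ x) = Finset.range lo := by
    ext i
    simp only [Finset.mem_filter, Finset.mem_range]
    constructor
    · rintro ⟨hlt, hx⟩
      by_contra hnot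
      exact absurd hx (not_le.mpr (h2 i (by omega) hlt))
    · intro hil
      exact ⟨by omega, h1 i hil⟩
  rw [hset, Finset.card_range]

lemma pvBisectR_correct (s : List Int) (x : Int) (hs : s.Pairwise (· ≤ ·))
    (hi0 : ℕ) (hhi0 : hi0 ≤ s.length) :
    ∀ d lo hi : ℕ, hi - lo ≤ d → lo ≤ hi → hi ≤ hi0 →
    (∀ i, i < lo → s.getD i 0 ≤ x) → (∀ i, hi ≤ i → i < hi0 → x < s.getD i 0) →
    pvBisectR s x (lo : Int) (hi : Int) =
      (((Finset.range hi0).filter (fun i => s.getD i 0 ≤ x)).card : Int) := by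
  intro d
  induction d with
  | zero =>
    intro lo hi hd hlh hhi h1 h2
    have heq : lo = hi := by omega
    subst heq
    rw [pvBisectR, dif_neg (by omega)]
    rw [pv_filter_card (by omega) h1 (fun i hi1 hi2 => h2 i hi1 hi2)]
  | succ d ih =>
    intro lo hi hd hlh hhi h1 h2
    by_cases hlt : lo < hi
    · rw [pvBisectR, dif_pos (by exact_mod_cast hlt)]
      have hmid : PySem.Int.floordiv ((lo : Int) + (hi : Int)) 2 = (((lo + hi) / 2 : ℕ) : Int) := by
        simp only [PySem.Int.floordiv]
        rw [Int.fdiv_eq_ediv]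
        simp
      set mid : ℕ := (lo + hi) / 2 with hmiddef
      have hmlo : lo ≤ mid := by omega
      have hmhi : mid < hi := by omega
      have hmlen : mid < s.length := by omega
      simp only [hmid, PySem.List.pyGet?_natCast, List.getElem?_eq_getElem hmlen]
      by_cases hx : x < s[mid]
      · rw [if_pos hx]
        exact ih lo mid (by omega) hmlo (by omega) h1
          (fun i him hih => lt_of_lt_of_le
            (by rw [← List.getD_eq_getElem s 0 hmlen] at hx; exact hx)
            (pv_mono hs him (by omega)))
      · rw [if_neg hx]
        have : ((mid : Int) + 1) = ((mid + 1 : ℕ) : Int) := by push_cast; ring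
        rw [this]
        exact ih (mid + 1) hi (by omega) (by omega) hhi
          (fun i hilt => le_trans (pv_mono hs (by omega : i ≤ mid) hmlen)
            (by rw [List.getD_eq_getElem s 0 hmlen]; omega)) h2
    · have heq : lo = hi := by omega
      subst heq
      rw [pvBisectR, dif_neg (by omega)]
      rw [pv_filter_card (by omega) h1 (fun i hi1 hi2 => h2 i hi1 hi2)]

lemma pvP_empty (T : Int) (s : List Int) {l r : ℕ} (h : r ≤ l) : pvP T s l r = 0 := by
  unfold pvP
  rw [Finset.Ico_eq_empty (by omega)]
  simp

lemma pvCnt_self (T : Int) (s : List Int) (l : ℕ) : pvCnt T s l l = 0 := by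
  unfold pvCnt
  rw [Finset.Ico_self]
  simp

lemma pvP_left_step (T : Int) {s : List Int} (hs : s.Pairwise (· ≤ ·)) {l r : ℕ}
    (hlr : l < r) (hr : r < s.length)
    (hg : s.getD l 0 + s.getD r 0 ≤ T) :
    pvP T s l r = (r - l) + pvP T s (l + 1) r := by
  unfold pvP
  have hterm : ∀ j ∈ Finset.Ico (l + 1) (r + 1), pvCnt T s l j = 1 + pvCnt T s (l + 1) j := by
    intro j hj
    rw [Finset.mem_Ico] at hj
    have hjr : j ≤ r := by omega
    have hgood : s.getD l 0 + s.getD j 0 ≤ T :=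
      le_trans (by have := pv_mono hs hjr hr; omega) hg
    unfold pvCnt
    rw [← Finset.Ico_union_Ico_eq_Ico (by omega : l ≤ l + 1) (by omega : l + 1 ≤ j),
        Finset.filter_union,
        Finset.card_union_of_disjoint
          (Finset.disjoint_filter_filter (Finset.Ico_disjoint_Ico_consecutive l (l + 1) j))]
    congr 1
    rw [Nat.Ico_succ_singleton, Finset.filter_singleton, if_pos hgood, Finset.card_singleton]
  rw [Finset.sum_congr rfl hterm, Finset.sum_add_distrib, Finset.sum_const, Nat.card_Ico,
      smul_eq_mul, mul_one]
  rw [Finset.sum_eq_sum_Ico_succ_bot (by omega : l + 1 < r + 1), pvCnt_self]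
  omega

lemma pvP_right_step (T : Int) {s : List Int} (hs : s.Pairwise (· ≤ ·)) {l r : ℕ}
    (hlr : l < r) (hr : r < s.length)
    (hb : ¬ s.getD l 0 + s.getD r 0 ≤ T) :
    pvP T s l r = pvP T s l (r - 1) := by
  unfold pvP
  have hr1 : r - 1 + 1 = r := by omega
  rw [hr1, Finset.sum_Ico_succ_top (by omega : l + 1 ≤ r)]
  have hzero : pvCnt T s l r = 0 := by
    unfold pvCnt
    rw [Finset.card_eq_zero, Finset.filter_eq_empty_iff]
    intro i hi
    rw [Finset.mem_Ico] at hi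
    have := pv_mono hs (hi.1 : l ≤ i) (by omega : i < s.length)
    omega
  rw [hzero]
  omega

lemma pvLoopA_correct (T : Int) {s : List Int} (hs : s.Pairwise (· ≤ ·)) :
    ∀ d l r : ℕ, r - l ≤ d → r < s.length → ∀ c : Int,
    pvLoopA T s (l : Int) (r : Int) c = c + (pvP T s l r : Int) := by
  intro d
  induction d with
  | zero =>
    intro l r hd hr c
    rw [pvLoopA, dif_neg (by omega), pvP_empty T s (by omega : r ≤ l)]
    simp
  | succ d ih =>
    intro l r hd hr c
    by_cases hlr : l < r
    · rw [pvLoopA, dif_pos (by exact_mod_cast hlr)]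
      have hllen : l < s.length := by omega
      simp only [PySem.List.pyGet?_natCast, List.getElem?_eq_getElem hllen,
        List.getElem?_eq_getElem hr]
      have hgl : s[l] = s.getD l 0 := (List.getD_eq_getElem s 0 hllen).symm
      have hgr : s[r] = s.getD r 0 := (List.getD_eq_getElem s 0 hr).symm
      by_cases hgood : s[l] + s[r] ≤ T
      · rw [if_pos hgood]
        have hc1 : ((l : Int) + 1) = ((l + 1 : ℕ) : Int) := by push_cast; ring
        rw [hc1, ih (l + 1) r (by omega) hr]
        rw [pvP_left_step T hs hlr hr (by rw [← hgl, ← hgr]; exact hgood)]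
        push_cast [Nat.sub_add_cancel]
        omega
      · rw [if_neg hgood]
        have hc1 : ((r : Int) - 1) = ((r - 1 : ℕ) : Int) := by push_cast [Nat.cast_sub (by omega : 1 ≤ r)]; ring
        rw [hc1, ih l (r - 1) (by omega) (by omega)]
        rw [pvP_right_step T hs hlr hr (by rw [← hgl, ← hgr]; exact hgood)]
    · rw [pvLoopA, dif_neg (by omega), pvP_empty T s (by omega : r ≤ l)]
      simp

lemma pv_sum_map (m : ℕ) (f : ℕ → ℕ) :
    ((List.range m).map (fun k => ((f k : ℕ) : Int))).sum
      = ((∑ k ∈ Finset.range m, f k : ℕ) : Int) := by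
  induction m with
  | zero => simp
  | succ m ih =>
    rw [List.range_succ, List.map_append, List.sum_append, Finset.sum_range_succ]
    push_cast
    push_cast at ih
    rw [ih]
    simp

-- ===== VERDICT (by name: the statement is the Claim_ definition above) =====
theorem find_budget_combinations2_spec : Claim_equal_find_budget_combinations2 := by
  intro T tg gp _hdom hpre
  show find_budget_combinations2 T tg gp = find_budget_combinations2_alt T tg gp
  unfold find_budget_combinations2 find_budget_combinations2_alt
  set s := PySem.List.sorted gp (fun x => x) with hsdef
  have hs : s.Pairwise (· ≤ ·) := PySem.List.sorted_pairwise gp (fun x => x)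
  have hlen : s.length = gp.length := PySem.List.length_sorted gp (fun x => x) false
  by_cases htg : tg ≤ 1
  · rw [pvLoopA, dif_neg (by omega), PySem.List.pyRange_one_eq_nil (by omega : tg ≤ 1)]
    simp
  · have hle : tg ≤ (gp.length : Int) := by
      rcases hpre with h | h
      · exact h
      · omega
    set n : ℕ := tg.toNat with hn
    have htgn : (n : Int) = tg := Int.toNat_of_nonneg (by omega)
    have hn2 : 2 ≤ n := by omega
    have hnlen : n ≤ s.length := by rw [hlen]; omega
    -- A side
    have hc0 : (tg - 1) = ((n - 1 : ℕ) : Int) := by push_cast [Nat.cast_sub (by omega : 1 ≤ n)]; omega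
    have hA : pvLoopA T s 0 (tg - 1) 0 = ((pvP T s 0 (n - 1) : ℕ) : Int) := by
      rw [hc0, show (0 : Int) = ((0 : ℕ) : Int) by rfl,
          pvLoopA_correct T hs (n - 1) 0 (n - 1) le_rfl (by omega)]
      simp
    rw [hA]
    -- B side
    rw [PySem.List.pyRange_one 1 tg]
    have hrn : (tg - 1).toNat = n - 1 := by omega
    rw [hrn, List.foldl_map]
    have hstep : ∀ (c : Int) (k : ℕ), k ∈ List.range (n - 1) →
        c + pvBisectR s (T - PySem.List.pyGetD s (1 + (k : Int)) 0) 0 (1 + (k : Int))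
          = c + ((pvCnt T s 0 (1 + k) : ℕ) : Int) := by
      intro c k hk
      rw [List.mem_range] at hk
      have hj : 1 + k ≤ s.length := by omega
      have hcast : (1 : Int) + (k : Int) = ((1 + k : ℕ) : Int) := by push_cast; ring
      rw [hcast, PySem.List.pyGetD_natCast]
      have hb := pvBisectR_correct s (T - s.getD (1 + k) 0) hs (1 + k) hj (1 + k) 0 (1 + k)
        (by omega) (by omega) le_rfl
        (fun i hi => absurd hi (by omega))
        (fun i hi1 hi2 => absurd (lt_of_le_of_lt hi1 hi2) (lt_irrefl _))
      rw [Nat.cast_zero] at hb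
      have hcc : ((Finset.range (1 + k)).filter
          (fun i => s.getD i 0 ≤ T - s.getD (1 + k) 0)).card = pvCnt T s 0 (1 + k) := by
        unfold pvCnt
        rw [Finset.range_eq_Ico]
        congr 1
        apply Finset.filter_congr
        intro i _
        constructor <;> intro h <;> omega
      rw [hb, hcc]
    rw [PySem.List.foldl_congr_mem (List.range (n - 1)) _
          (fun (c : Int) (k : ℕ) => c + ((pvCnt T s 0 (1 + k) : ℕ) : Int)) 0 hstep]
    rw [PySem.List.foldl_add (List.range (n - 1))
          (fun k : ℕ => ((pvCnt T s 0 (1 + k) : ℕ) : Int)) 0]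
    rw [zero_add]
    rw [pv_sum_map (n - 1) (fun k => pvCnt T s 0 (1 + k))]
    congr 1
    unfold pvP
    rw [Finset.sum_Ico_eq_sum_range]
    have : n - 1 + 1 - (0 + 1) = n - 1 := by omega
    rw [this]
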